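-- pv_equiv track=rewrite | github.com/calvinsy-is-not-available/comp110-21f-workspace | projects/pj01/data_utils.py | count
-- ===== SOURCE A (Python) =====
-- def count(notes: list[str]) -> dict[str, int]:
--     """Produces a dict with a count of its keys/values."""
--     book: dict[str, int] = {}
--     for element in notes:
--         if element not in book:
--             book[element] = 1
--         else:
--             if element in book:
--                 book[element] += 1
--     return book
-- ===== SOURCE B (Python) =====
-- def count(notes: list[str]) -> dict[str, int]:
--     """Produces a dict with a count of its keys/values."""
--     keys = dict.fromkeys(notes)
--     return {s: notes.count(s) for s in keys}
-- ===== Notes on version B (the rewrite author's own statement) =====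
-- stated objective: alternative
-- what changed: Replaces A's single accumulating dict pass with collecting the first-occurrence-ordered distinct keys (dict.fromkeys) and counting each key by a separate scan of the list.
import Mathlib
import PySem

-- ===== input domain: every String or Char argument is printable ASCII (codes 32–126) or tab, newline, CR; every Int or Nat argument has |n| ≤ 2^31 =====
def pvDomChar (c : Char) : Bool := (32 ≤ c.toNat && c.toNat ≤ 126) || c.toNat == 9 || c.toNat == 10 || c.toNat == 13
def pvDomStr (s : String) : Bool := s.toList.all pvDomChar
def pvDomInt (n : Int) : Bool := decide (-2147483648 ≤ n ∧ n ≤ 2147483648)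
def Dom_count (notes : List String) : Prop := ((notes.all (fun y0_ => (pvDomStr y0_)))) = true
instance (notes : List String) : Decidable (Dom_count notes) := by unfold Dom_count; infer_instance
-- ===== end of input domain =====

-- B replaces A's single accumulating dict pass with an ordered distinct-key extraction followed by a per-key count scan (alternative decomposition, not faster).


-- ===== PORT A =====
def count (notes : List String) : List (String × Int) :=
  (notes.foldl (fun book element =>
      if ¬ book.contains element then
        book.insert element 1
      else
        if book.contains element then
          book.insert element (book.getD element 0 + 1)
        else
          book)
    (PySem.Dict.empty : PySem.Dict String Int)).items

-- ===== PORT B =====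
def count_alt (notes : List String) : List (String × Int) :=
  (PySem.List.dedup notes).map (fun s => (s, (notes.count s : Int)))

-- ===== PRECONDITION & SPEC =====
def Spec_count (notes : List String) (out : List (String × Int)) : Prop := out = count_alt notes
instance (notes : List String) (out : List (String × Int)) : Decidable (Spec_count notes out) := by unfold Spec_count; infer_instance

-- ===== CLAIM (what is proved, stated in full; the proofs are below) =====
def Claim_equal_count : Prop := ∀ (notes : List String), Dom_count notes → Spec_count notes (count notes)

-- ===== LEMMAS AND PROOFS =====

-- ===== VERDICT (by name: the statement is the Claim_ definition above) =====
theorem count_fold_eq (notes : List String) :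
    count notes = (PySem.Dict.counter notes).items := by
  unfold count
  rw [← PySem.Dict.foldl_insert_getD_add_one_eq_counter]
  have hf : (fun (book : PySem.Dict String Int) element =>
        if ¬book.contains element = true then book.insert element 1
        else if book.contains element = true then book.insert element (book.getD element 0 + 1) else book)
      = fun (d : PySem.Dict String Int) x => d.insert x (d.getD x 0 + 1) := by
    funext book element
    by_cases hc : book.contains element = true
    · simp [hc]
    · have h0 : book.getD element (0:Int) = 0 := by
        rw [PySem.Dict.getD_of_not_contains]
        simp [hc]
      simp [hc, h0]
  rw [hf]

theorem count_spec : Claim_equal_count := by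
  intro notes _
  unfold Spec_count count_alt
  rw [count_fold_eq, PySem.Dict.items_counter, PySem.List.dedup_eq_ofList]
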